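-- pv_equiv track=rewrite | github.com/ktawiah/CodePath-DSA | Unit-1/Session-2/Standard_V2/count_endangered.py | count_endangered_species
-- ===== SOURCE A (Python) =====
-- def count_endangered_species(endangered_species, observed_species):
--     """
--         endangered_species1 = "aA"
--     observed_species1 = "aAAbbbb"
--
--         P: Determine the number of endangered of endangered species observed
--     """
--     counter = 0
--
--     species_dict = {}
--
--     for specie in observed_species:
--         species_dict[specie] = species_dict.get(specie, 0) + 1
--
--         # if specie not in species_dict:
--         #     species_dict[specie] = 1
--         # else:
--         #     species_dict[specie] = species_dict.get(specie) + 1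
--
--     for specie in endangered_species:
--         if specie in species_dict.keys():
--             counter += species_dict.get(specie)
--
--     return counter
-- ===== SOURCE B (Python) =====
-- def count_endangered_species(endangered_species, observed_species):
--     eo = sorted(endangered_species)
--     oo = sorted(observed_species)
--     total = 0
--     i = 0
--     j = 0
--     while i < len(eo) and j < len(oo):
--         if eo[i] < oo[j]:
--             i += 1
--         elif oo[j] < eo[i]:
--             j += 1
--         else:
--             c = eo[i]
--             ce = 0
--             while i < len(eo) and eo[i] == c:
--                 ce += 1
--                 i += 1
--             co = 0
--             while j < len(oo) and oo[j] == c: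
--                 co += 1
--                 j += 1
--             total += ce * co
--     return total
-- ===== Notes on version B (the rewrite author's own statement) =====
-- stated objective: alternative
-- what changed: Replaces A's frequency dictionary with a sort-then-merge: both strings are sorted and a two-pointer sweep multiplies the lengths of matching equal-character runs, summing the products.
import Mathlib
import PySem

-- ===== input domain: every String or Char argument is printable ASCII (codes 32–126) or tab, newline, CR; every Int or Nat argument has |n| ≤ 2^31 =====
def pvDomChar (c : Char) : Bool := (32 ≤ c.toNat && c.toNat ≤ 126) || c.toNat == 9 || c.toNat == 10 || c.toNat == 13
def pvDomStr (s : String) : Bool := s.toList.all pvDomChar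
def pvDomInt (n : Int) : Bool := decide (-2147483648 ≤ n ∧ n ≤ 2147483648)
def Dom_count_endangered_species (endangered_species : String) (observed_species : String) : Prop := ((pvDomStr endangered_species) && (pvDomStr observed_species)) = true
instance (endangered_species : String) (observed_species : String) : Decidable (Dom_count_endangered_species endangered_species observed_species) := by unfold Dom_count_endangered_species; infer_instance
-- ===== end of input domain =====

-- B replaces A's frequency dictionary with a sort-then-merge two-pointer sweep multiplying matching run lengths (alternative algorithm, not faster).


-- ===== PORT A =====
def count_endangered_species (endangered_species : String) (observed_species : String) : Int :=
  -- species_dict[specie] = species_dict.get(specie, 0) + 1  over observed_species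
  let species_dict : PySem.Dict Char Int :=
    observed_species.toList.foldl (fun d specie => d.insert specie (d.getD specie 0 + 1)) PySem.Dict.empty
  -- for specie in endangered_species: if specie in species_dict.keys(): counter += species_dict.get(specie)
  endangered_species.toList.foldl
    (fun counter specie =>
      if specie ∈ species_dict.keys then counter + (species_dict.get? specie).getD 0 else counter) 0

-- ===== PORT B =====
-- the outer while loop of Source B: consuming the two sorted lists from the front is the structural
-- form of advancing the indices i and j; the two inner run-counting while loops are takeWhile/dropWhile
def pvMergeRuns : List Char → List Char → Int
  | [], _ => 0
  | _ :: _, [] => 0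
  | a :: as, b :: bs =>
    if a < b then pvMergeRuns as (b :: bs)
    else if b < a then pvMergeRuns (a :: as) bs
    else
      -- equal heads: count the run of c = a in each list, add ce * co, continue past both runs
      ((1 + (as.takeWhile (· == a)).length : Int) * (1 + (bs.takeWhile (· == a)).length : Int))
        + pvMergeRuns (as.dropWhile (· == a)) (bs.dropWhile (· == a))
termination_by E O => E.length + O.length
decreasing_by
  · simp only [List.length_cons]; omega
  · simp only [List.length_cons]; omega
  · have h1 := List.length_dropWhile_le (p := (· == a)) (l := as)
    have h2 := List.length_dropWhile_le (p := (· == a)) (l := bs)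
    simp only [List.length_cons]; omega

def count_endangered_species_alt (endangered_species : String) (observed_species : String) : Int :=
  pvMergeRuns (PySem.List.sorted endangered_species.toList (fun x => x) false)
              (PySem.List.sorted observed_species.toList (fun x => x) false)

-- ===== PRECONDITION & SPEC =====
def Spec_count_endangered_species (endangered_species : String) (observed_species : String) (out : Int) : Prop := out = count_endangered_species_alt endangered_species observed_species
instance (endangered_species : String) (observed_species : String) (out : Int) : Decidable (Spec_count_endangered_species endangered_species observed_species out) := by unfold Spec_count_endangered_species; infer_instance

-- ===== CLAIM (what is proved, stated in full; the proofs are below) =====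
def Claim_equal_count_endangered_species : Prop := ∀ (endangered_species : String) (observed_species : String), Dom_count_endangered_species endangered_species observed_species → Spec_count_endangered_species endangered_species observed_species (count_endangered_species endangered_species observed_species)

-- ===== LEMMAS AND PROOFS =====

-- A's loop body equals the multiplicity of the character in observed_species.
theorem pv_body_eq (obs : List Char) (c : Char) :
    (let d := obs.foldl (fun d specie => d.insert specie (d.getD specie 0 + 1)) PySem.Dict.empty
     if c ∈ d.keys then ((d.get? c).getD 0 : Int) else 0) = (obs.count c : Int) := by
  have hD : (obs.foldl (fun d specie => d.insert specie (d.getD specie 0 + 1))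
      (PySem.Dict.empty : PySem.Dict Char Int)).getD c 0
      = (PySem.Dict.empty : PySem.Dict Char Int).getD c 0 + obs.count c :=
    PySem.Dict.getD_foldl_insert_add_one obs PySem.Dict.empty c
  have hK : (obs.foldl (fun d specie => d.insert specie (d.getD specie 0 + 1))
      (PySem.Dict.empty : PySem.Dict Char Int)).keys
      = PySem.Set.update (PySem.Dict.empty : PySem.Dict Char Int).keys obs :=
    PySem.Dict.keys_foldl_insert obs _ _
  simp only []
  split_ifs with h
  · simpa [PySem.Dict.getD] using hD
  · have hc : obs.count c = 0 := by
      apply List.count_eq_zero.mpr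
      intro hmem
      exact h (by rw [hK]; exact (PySem.Set.mem_update _ obs c).mpr (Or.inr hmem))
    simp [hc]

theorem pv_foldl_add (f : Char → Int) (l : List Char) (init : Int) :
    l.foldl (fun acc c => acc + f c) init = init + (l.map f).sum := by
  induction l generalizing init with
  | nil => simp
  | cons a as ih => simp [List.foldl_cons, ih]; ring

-- A computes Σ_{c ∈ endangered} count of c in observed.
theorem pvA_eq_sum (e o : String) :
    count_endangered_species e o
      = (e.toList.map (fun c => (o.toList.count c : Int))).sum := by
  unfold count_endangered_species
  simp only []
  have hbody : ∀ (counter : Int) (c : Char),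
      (if c ∈ (o.toList.foldl (fun d specie => d.insert specie (d.getD specie 0 + 1))
              (PySem.Dict.empty : PySem.Dict Char Int)).keys then
        counter + ((o.toList.foldl (fun d specie => d.insert specie (d.getD specie 0 + 1))
              (PySem.Dict.empty : PySem.Dict Char Int)).get? c).getD 0
       else counter)
      = counter + (o.toList.count c : Int) := by
    intro counter c
    have := pv_body_eq o.toList c
    simp only [] at this
    split_ifs with h <;> split_ifs at this <;> omega
  have hfun : (fun (counter : Int) (c : Char) =>
      if c ∈ (o.toList.foldl (fun d specie => d.insert specie (d.getD specie 0 + 1))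
              (PySem.Dict.empty : PySem.Dict Char Int)).keys then
        counter + ((o.toList.foldl (fun d specie => d.insert specie (d.getD specie 0 + 1))
              (PySem.Dict.empty : PySem.Dict Char Int)).get? c).getD 0
      else counter)
      = (fun (counter : Int) (c : Char) => counter + (o.toList.count c : Int)) := by
    funext counter c
    exact hbody counter c
  rw [hfun, pv_foldl_add]
  ring

-- elements surviving dropWhile (== a) in a sorted list with lower bound a are strictly greater than a
theorem pv_dropWhile_gt (a : Char) (l : List Char)
    (hp : l.Pairwise (· ≤ ·)) (hb : ∀ x ∈ l, a ≤ x) :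
    ∀ x ∈ l.dropWhile (· == a), a < x := by
  induction l with
  | nil => simp
  | cons y ys ih =>
    rw [List.dropWhile_cons]
    by_cases hy : (y == a) = true
    · simp only [hy, if_true]
      exact ih hp.of_cons (fun x hx => hb x (List.mem_cons_of_mem _ hx))
    · simp only [hy]
      intro x hx
      have hay : a < y := lt_of_le_of_ne (hb y (List.mem_cons_self ..))
        (fun h => hy (by simp [h.symm]))
      rcases List.mem_cons.mp hx with h | h
      · exact h ▸ hay
      · exact lt_of_lt_of_le hay ((List.pairwise_cons.mp hp).1 x h)

-- merge of sorted lists computes the same sum.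
theorem pvMerge_eq (E O : List Char) (hE : E.Pairwise (· ≤ ·)) (hO : O.Pairwise (· ≤ ·)) :
    pvMergeRuns E O = (E.map (fun c => (O.count c : Int))).sum := by
  induction E, O using pvMergeRuns.induct with
  | case1 O => simp [pvMergeRuns]
  | case2 a as => simp [pvMergeRuns]
  | case3 a as b bs hab ih =>
    have hcount : (b :: bs).count a = 0 := by
      apply List.count_eq_zero.mpr
      intro hmem
      rcases List.mem_cons.mp hmem with h | h
      · exact absurd (h ▸ hab) (lt_irrefl b)
      · exact absurd hab (not_lt.mpr ((List.pairwise_cons.mp hO).1 a h))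
    rw [pvMergeRuns]
    simp only [if_pos hab]
    rw [ih hE.of_cons hO, List.map_cons, List.sum_cons, hcount]
    simp
  | case4 a as b bs hab hba ih =>
    rw [pvMergeRuns]
    simp only [if_neg hab, if_pos hba]
    rw [ih hE hO.of_cons]
    congr 1
    apply List.map_congr_left
    intro x hx
    have hax : a ≤ x := by
      rcases List.mem_cons.mp hx with h | h
      · exact h ▸ le_refl a
      · exact (List.pairwise_cons.mp hE).1 x h
    have hbx : b ≠ x := fun h => absurd (h ▸ (lt_of_lt_of_le hba hax)) (lt_irrefl _)
    rw [List.count_cons]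
    simp [hbx]
  | case5 a as b bs hab hba ih =>
    have heq : b = a := le_antisymm (not_lt.mp hab) (not_lt.mp hba)
    subst heq
    rw [pvMergeRuns]
    rw [if_neg hab, if_neg hba]
    -- notation
    set ta := as.takeWhile (· == b) with hta
    set da := as.dropWhile (· == b) with hda
    set tb := bs.takeWhile (· == b) with htb
    set db := bs.dropWhile (· == b) with hdb
    have hbas : ∀ x ∈ as, b ≤ x := (List.pairwise_cons.mp hE).1
    have hbbs : ∀ x ∈ bs, b ≤ x := (List.pairwise_cons.mp hO).1
    have hta_all : ∀ x ∈ ta, x = b := fun x hx => by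
      simpa using List.mem_takeWhile_imp hx
    have htb_all : ∀ x ∈ tb, x = b := fun x hx => by
      simpa using List.mem_takeWhile_imp hx
    have hda_gt : ∀ x ∈ da, b < x := pv_dropWhile_gt b as hE.of_cons hbas
    have hdb_gt : ∀ x ∈ db, b < x := pv_dropWhile_gt b bs hO.of_cons hbbs
    have hsplitA : as = ta ++ da := (List.takeWhile_append_dropWhile).symm
    have hsplitB : bs = tb ++ db := (List.takeWhile_append_dropWhile).symm
    -- count of b in observed
    have hcb_tb : tb.count b = tb.length := by
      apply List.count_eq_length.mpr
      intro x hx; exact (htb_all x hx).symm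
    have hcb_db : db.count b = 0 := by
      apply List.count_eq_zero.mpr
      intro h; exact absurd (hdb_gt b h) (lt_irrefl b)
    have hcbO : (b :: bs).count b = 1 + tb.length := by
      rw [List.count_cons_self, hsplitB, List.count_append, hcb_tb, hcb_db]
      omega
    -- ih needs sortedness of the tails
    have hdaP : da.Pairwise (· ≤ ·) := hE.of_cons.sublist (List.dropWhile_sublist _)
    have hdbP : db.Pairwise (· ≤ ·) := hO.of_cons.sublist (List.dropWhile_sublist _)
    have hcount_da : ∀ x ∈ da, (b :: bs).count x = db.count x := by
      intro x hx
      have hbx : b < x := hda_gt x hx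
      have h1 : tb.count x = 0 := by
        apply List.count_eq_zero.mpr
        intro h
        exact absurd (htb_all x h ▸ hbx) (lt_irrefl _)
      rw [List.count_cons, hsplitB, List.count_append, h1]
      have : ¬ (b == x) = true := by
        simp only [beq_iff_eq]; exact fun h => absurd (h ▸ hbx) (lt_irrefl _)
      simp [this]
    -- assemble
    rw [ih hdaP hdbP]
    have hmap_da : (da.map (fun c => ((b :: bs).count c : Int))).sum
        = (da.map (fun c => (db.count c : Int))).sum := by
      congr 1
      apply List.map_congr_left
      intro x hx; rw [hcount_da x hx]
    have hmap_ta : (ta.map (fun c => ((b :: bs).count c : Int))).sum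
        = (ta.length : Int) * (1 + tb.length) := by
      have : ta.map (fun c => ((b :: bs).count c : Int))
          = List.replicate ta.length ((1 + tb.length : Nat) : Int) := by
        rw [List.eq_replicate_iff]
        constructor
        · simp
        · intro x hx
          rcases List.mem_map.mp hx with ⟨c, hc, hcx⟩
          rw [← hcx, hta_all c hc, hcbO]
      rw [this, List.sum_replicate, nsmul_eq_mul]
      push_cast; ring
    rw [List.map_cons, List.sum_cons, hsplitA, List.map_append, List.sum_append,
      hmap_ta, hmap_da, hcbO]
    push_cast; ring

-- ===== VERDICT (by name: the statement is the Claim_ definition above) =====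
theorem count_endangered_species_spec : Claim_equal_count_endangered_species := by
  intro e o _
  unfold Spec_count_endangered_species count_endangered_species_alt
  have hpermE := PySem.List.sorted_perm e.toList (fun x => x) false
  have hpermO := PySem.List.sorted_perm o.toList (fun x => x) false
  have hPE : (PySem.List.sorted e.toList (fun x => x) false).Pairwise (· ≤ ·) := by
    simpa using PySem.List.sorted_pairwise e.toList (fun x => x)
  have hPO : (PySem.List.sorted o.toList (fun x => x) false).Pairwise (· ≤ ·) := by
    simpa using PySem.List.sorted_pairwise o.toList (fun x => x)
  rw [pvA_eq_sum, pvMerge_eq _ _ hPE hPO]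
  have hcnt : ∀ c : Char,
      (PySem.List.sorted o.toList (fun x => x) false).count c = o.toList.count c :=
    fun c => hpermO.count_eq c
  calc (e.toList.map (fun c => (o.toList.count c : Int))).sum
      = ((PySem.List.sorted e.toList (fun x => x) false).map
          (fun c => (o.toList.count c : Int))).sum := ((hpermE.map _).sum_eq).symm
    _ = ((PySem.List.sorted e.toList (fun x => x) false).map
          (fun c => ((PySem.List.sorted o.toList (fun x => x) false).count c : Int))).sum := by
        congr 1
        apply List.map_congr_left
        intro x _
        rw [hcnt x]
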